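-- pv_equiv track=rewrite | github.com/yunn3/recursion-problems | intermediate/178-intersectionOfArraysRepeats/other.py | intersectionOfArraysRepeats
-- ===== SOURCE A (Python) =====
-- from collections import defaultdict
--
-- def intersectionOfArraysRepeats(int_list_1: list, int_list_2: list) -> list:
--     item_count_map = defaultdict(int)
--     for item in int_list_1:
--         item_count_map[item] += 1
--
--     def _is_there_left(_item: int) -> bool:
--         result = item_count_map[_item] > 0
--         if result:
--             item_count_map[_item] -= 1
--         return result
--
--     return sorted(item for item in int_list_2 if _is_there_left(item))
-- ===== SOURCE B (Python) =====
-- from collections import Counter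
--
-- def intersectionOfArraysRepeats(int_list_1: list, int_list_2: list) -> list:
--     return sorted((Counter(int_list_1) & Counter(int_list_2)).elements())
-- ===== Notes on version B (the rewrite author's own statement) =====
-- stated objective: simpler
-- what changed: A counts list1 into a defaultdict and then runs a stateful consume-and-decrement filter pass over list2 with a Python-level closure per element; B builds two Counters symmetrically, intersects them with & (pairwise min of counts, no mutation during traversal) and sorts the expanded elements().
import Mathlib
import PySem

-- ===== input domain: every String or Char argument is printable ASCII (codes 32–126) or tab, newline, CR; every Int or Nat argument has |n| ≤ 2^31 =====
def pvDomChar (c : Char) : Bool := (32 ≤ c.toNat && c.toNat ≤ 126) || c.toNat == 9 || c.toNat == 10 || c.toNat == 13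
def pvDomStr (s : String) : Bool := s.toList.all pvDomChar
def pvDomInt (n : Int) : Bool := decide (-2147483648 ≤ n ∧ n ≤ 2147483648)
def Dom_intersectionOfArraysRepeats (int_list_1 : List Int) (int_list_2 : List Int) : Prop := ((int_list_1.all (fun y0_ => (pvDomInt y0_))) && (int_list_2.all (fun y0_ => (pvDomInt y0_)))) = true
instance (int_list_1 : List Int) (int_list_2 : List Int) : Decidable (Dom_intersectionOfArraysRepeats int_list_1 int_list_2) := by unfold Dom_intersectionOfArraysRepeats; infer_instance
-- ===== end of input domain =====

-- B replaces A's count-then-consume stateful filter over list2 by a symmetric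
-- Counter-intersection (pairwise min of the two counts) expanded and sorted; objective: simpler.

-- ===== PORT A =====
-- count list1 into a defaultdict, then keep items of list2 while a count is left, then sort
def intersectionOfArraysRepeats (int_list_1 : List Int) (int_list_2 : List Int) : List Int :=
  let item_count_map : PySem.Dict Int Int :=
    int_list_1.foldl (fun d item => d.modify item 0 (· + 1)) PySem.Dict.empty
  let st :=
    int_list_2.foldl
      (fun (s : PySem.Dict Int Int × List Int) item =>
        if 0 < s.1.getD item 0 then (s.1.modify item 0 (· - 1), s.2 ++ [item]) else (s.1, s.2))
      (item_count_map, [])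
  PySem.List.sorted st.2 (fun x => x) false

-- ===== PORT B =====
-- Counter(l1) & Counter(l2): iterate Counter(l1)'s items, keep min(count, other count) when positive
-- (CPython's Counter.__and__); .elements() expands each item to `count` copies; then sorted.
def intersectionOfArraysRepeats_alt (int_list_1 : List Int) (int_list_2 : List Int) : List Int :=
  let c1 := PySem.Dict.counter int_list_1
  let c2 := PySem.Dict.counter int_list_2
  let inter : PySem.Dict Int Int :=
    c1.items.foldl
      (fun (d : PySem.Dict Int Int) p =>
        if 0 < min p.2 (c2.getD p.1 0) then d.insert p.1 (min p.2 (c2.getD p.1 0)) else d)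
      PySem.Dict.empty
  PySem.List.sorted (inter.items.flatMap (fun p => List.replicate p.2.toNat p.1)) (fun x => x) false

-- ===== PRECONDITION & SPEC =====
def Spec_intersectionOfArraysRepeats (int_list_1 : List Int) (int_list_2 : List Int) (out : List Int) : Prop := out = intersectionOfArraysRepeats_alt int_list_1 int_list_2
instance (int_list_1 : List Int) (int_list_2 : List Int) (out : List Int) : Decidable (Spec_intersectionOfArraysRepeats int_list_1 int_list_2 out) := by unfold Spec_intersectionOfArraysRepeats; infer_instance

-- ===== CLAIM (what is proved, stated in full; the proofs are below) =====
def Claim_equal_intersectionOfArraysRepeats : Prop := ∀ (int_list_1 : List Int) (int_list_2 : List Int), Dom_intersectionOfArraysRepeats int_list_1 int_list_2 → Spec_intersectionOfArraysRepeats int_list_1 int_list_2 (intersectionOfArraysRepeats int_list_1 int_list_2)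

-- ===== LEMMAS AND PROOFS =====

-- A's consuming loop: the accepted occurrences of v number min(budget for v, occurrences in l2)
lemma countA_loop (l2 : List Int) (d : PySem.Dict Int Int) (acc : List Int) (v : Int)
    (h : 0 ≤ d.getD v 0) :
    ((l2.foldl
      (fun (s : PySem.Dict Int Int × List Int) item =>
        if 0 < s.1.getD item 0 then (s.1.modify item 0 (· - 1), s.2 ++ [item]) else (s.1, s.2))
      (d, acc)).2).count v
    = acc.count v + min (d.getD v 0).toNat (l2.count v) := by
  induction l2 generalizing d acc with
  | nil => simp
  | cons x t ih =>
    rw [List.foldl_cons]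
    dsimp only
    by_cases hx : x = v
    · subst hx
      by_cases hp : 0 < d.getD x 0
      · rw [if_pos hp]
        rw [ih _ _ (by rw [PySem.Dict.getD_modify_self]; omega)]
        rw [PySem.Dict.getD_modify_self]
        simp [List.count_append, List.count_cons_self]
        omega
      · rw [if_neg hp]
        rw [ih _ _ h]
        have h0 : (d.getD x 0).toNat = 0 := by omega
        simp [h0, List.count_cons_self]
    · by_cases hp : 0 < d.getD x 0
      · rw [if_pos hp]
        rw [ih _ _ (by rw [PySem.Dict.getD_modify_of_ne _ _ _ (fun e => hx e.symm)]; exact h)]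
        rw [PySem.Dict.getD_modify_of_ne _ _ _ (fun e => hx e.symm)]
        simp [List.count_append, List.count_cons_of_ne hx]
      · rw [if_neg hp]
        rw [ih _ _ h]
        simp [List.count_cons_of_ne hx]

-- counts in elements(): sum of the replicated multiplicities at key v
lemma count_flatMap_replicate (L : List (Int × Int)) (v : Int) :
    (L.flatMap (fun p => List.replicate p.2.toNat p.1)).count v
    = (L.map (fun p => if p.1 = v then p.2.toNat else 0)).sum := by
  induction L with
  | nil => simp
  | cons p t ih =>
    rw [List.flatMap_cons, List.count_append, ih, List.map_cons, List.sum_cons]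
    by_cases h : p.1 = v
    · simp [h]
    · simp [h, List.count_replicate]

-- over a Nodup key list, the positivity-filtered single-key sum is just g v (toNat kills ≤ 0)
lemma sum_single_key (ks : List Int) (hnd : ks.Nodup) (v : Int) (g : Int → Int) :
    (((ks.filter (fun k => decide (0 < g k))).map
        (fun k => if k = v then (g k).toNat else 0)).sum)
    = if v ∈ ks then (g v).toNat else 0 := by
  induction ks with
  | nil => simp
  | cons k t ih =>
    have hnd' := hnd.of_cons
    by_cases hk : k = v
    · subst hk
      have hvt : k ∉ t := (List.nodup_cons.mp hnd).1
      by_cases hp : 0 < g k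
      · simp [hp, ih hnd', hvt]
      · have h0 : (g k).toNat = 0 := by omega
        simp [hp, ih hnd', hvt, h0]
    · by_cases hp : 0 < g k
      · simp [hp, ih hnd', hk, List.mem_cons, Ne.symm hk]
      · simp [hp, ih hnd', List.mem_cons, Ne.symm hk]

-- B's expanded intersection counts v exactly min(count in l1, count in l2) times
lemma countB (l1 l2 : List Int) (v : Int) :
    (((PySem.Dict.counter l1 : PySem.Dict Int Int).items.foldl
      (fun (d : PySem.Dict Int Int) p =>
        if 0 < min p.2 ((PySem.Dict.counter l2 : PySem.Dict Int Int).getD p.1 0)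
        then d.insert p.1 (min p.2 ((PySem.Dict.counter l2).getD p.1 0)) else d)
      PySem.Dict.empty).items.flatMap (fun p => List.replicate p.2.toNat p.1)).count v
    = min (l1.count v) (l2.count v) := by
  rw [PySem.List.foldl_ite_eq_foldl_filter]
  have hnodup : (((PySem.Dict.counter l1 : PySem.Dict Int Int).items.filter
      (fun x => decide (0 < min x.2 ((PySem.Dict.counter l2).getD x.1 0)))).map Prod.fst).Nodup := by
    exact ((List.filter_sublist).map Prod.fst).nodup (PySem.Dict.nodup_keys_counter l1)
  rw [PySem.Dict.items_foldl_insert_fresh _ Prod.fst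
      (fun p => min p.2 ((PySem.Dict.counter l2).getD p.1 0)) PySem.Dict.empty
      (fun a _ => PySem.Dict.contains_empty (a.1)) hnodup]
  have hempty : (PySem.Dict.empty : PySem.Dict Int Int).items = [] := rfl
  rw [count_flatMap_replicate, hempty, List.nil_append]
  rw [PySem.Dict.items_counter, List.filter_map, List.map_map, List.map_map]
  simp only [Function.comp_def, PySem.Dict.getD_counter]
  rw [sum_single_key (PySem.Set.ofList l1) (PySem.Set.nodup_ofList l1) v
      (fun k => min ((l1.count k : Int)) ((l2.count k : Int)))]
  by_cases hv : v ∈ l1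
  · rw [if_pos ((PySem.Set.mem_ofList _ _).mpr hv)]
    omega
  · rw [if_neg (fun hm => hv ((PySem.Set.mem_ofList _ _).mp hm))]
    have : l1.count v = 0 := List.count_eq_zero.mpr hv
    omega

-- ===== VERDICT (by name: the statement is the Claim_ definition above) =====
theorem intersectionOfArraysRepeats_spec : Claim_equal_intersectionOfArraysRepeats := by
  intro l1 l2 _
  unfold Spec_intersectionOfArraysRepeats intersectionOfArraysRepeats intersectionOfArraysRepeats_alt
  apply PySem.List.sorted_eq_sorted_of_perm _ _ _ (fun a b h => h)
  rw [List.perm_iff_count]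
  intro v
  rw [countB l1 l2 v]
  have hbudget : ((l1.foldl (fun d item => d.modify item 0 (· + 1))
      (PySem.Dict.empty : PySem.Dict Int Int)).getD v 0) = (l1.count v : Int) := by
    rw [PySem.Dict.getD_foldl_modify_add_one]
    simp [PySem.Dict.getD_empty]
  rw [countA_loop l2 _ [] v (by rw [hbudget]; positivity)]
  rw [hbudget]
  simp
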